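-- pv_equiv track=rewrite | github.com/miya256/atcoder_lib_py | legacy/number_theory/floor_sum.py | floor_sum
-- ===== SOURCE A (Python) =====
-- def floor_sum(n, m, a, b):
--     ans = 0
--     while True:
--         if a >= m or a < 0:
--             ans += n * (n - 1) * (a // m) // 2
--             a %= m
--         if b >= m or b < 0:
--             ans += n * (b // m)
--             b %= m
--         y_max = a * n + b
--         if y_max < m: break
--         n, b, m, a = y_max // m, y_max % m, a, m
--     return ans
-- ===== SOURCE B (Python) =====
-- def floor_sum(n, m, a, b):
--     ans = n * (n - 1) // 2 * (a // m) + n * (b // m)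
--     a %= m
--     b %= m
--     y_max = a * n + b
--     if y_max < m:
--         return ans
--     return ans + floor_sum(y_max // m, a, m, y_max % m)
-- ===== Notes on version B (the rewrite author's own statement) =====
-- stated objective: alternative
-- what changed: The while-True loop with conditional in-place normalization and a running accumulator is restated as a direct tail recursion on the Euclidean recurrence: unconditionally add n*(n-1)//2*(a//m) + n*(b//m), reduce a,b mod m, and recurse once on the permuted state (y_max//m, a, m, y_max%m).
-- outside the precondition, e.g. on floor_sum(14, -15, 11, 4): A returns -105, B returns -105
import Mathlib
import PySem

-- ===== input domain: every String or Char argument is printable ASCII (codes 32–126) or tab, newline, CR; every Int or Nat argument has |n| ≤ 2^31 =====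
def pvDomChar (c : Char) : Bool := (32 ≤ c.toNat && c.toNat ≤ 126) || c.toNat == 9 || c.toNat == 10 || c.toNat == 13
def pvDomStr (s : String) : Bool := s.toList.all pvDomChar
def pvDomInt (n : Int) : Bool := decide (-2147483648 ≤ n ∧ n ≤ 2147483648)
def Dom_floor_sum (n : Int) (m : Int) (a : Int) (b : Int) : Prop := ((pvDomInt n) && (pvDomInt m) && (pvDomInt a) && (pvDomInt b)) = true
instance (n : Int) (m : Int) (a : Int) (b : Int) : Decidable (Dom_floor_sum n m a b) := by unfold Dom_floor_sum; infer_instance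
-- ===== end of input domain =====

-- B re-states A's while-loop as a direct tail recursion on the Euclidean recurrence (alternative decomposition, same cost);
-- equivalence is claimed for the return value on the natural domain 0 < m.

-- ===== PORT A =====
-- A's `while True` loop as a recursive loop function over the same state (n, m, a, b, ans).
-- The `m ≤ 0` guard only makes the recursion total: Python raises ZeroDivisionError or loops there (outside Pre_).
def floorSumLoopA (n : Int) (m : Int) (a : Int) (b : Int) (ans : Int) : Int :=
  if hm : m ≤ 0 then ans
  else
    let ans1 := if a ≥ m ∨ a < 0 then ans + PySem.Int.floordiv (n * (n - 1) * (PySem.Int.floordiv a m)) 2 else ans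
    let a1 := if a ≥ m ∨ a < 0 then PySem.Int.mod a m else a
    let ans2 := if b ≥ m ∨ b < 0 then ans1 + n * PySem.Int.floordiv b m else ans1
    let b1 := if b ≥ m ∨ b < 0 then PySem.Int.mod b m else b
    let y_max := a1 * n + b1
    if y_max < m then ans2
    else floorSumLoopA (PySem.Int.floordiv y_max m) a1 m (PySem.Int.mod y_max m) ans2
termination_by m.toNat
decreasing_by
  have hm' : 0 < m := by omega
  have h1 : 0 ≤ a1 ∧ a1 < m := by
    simp only [a1]
    split
    · exact ⟨PySem.Int.mod_nonneg a hm', PySem.Int.mod_lt a hm'⟩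
    · omega
  omega

def floor_sum (n : Int) (m : Int) (a : Int) (b : Int) : Int :=
  floorSumLoopA n m a b 0

-- ===== PORT B =====
-- Transliteration of Source B: normalize a, b into [0, m) up front (accumulating the two quotient terms),
-- then one tail-recursive call on the permuted state.  Same totality guard for m ≤ 0 (outside Pre_).
def floor_sum_alt (n : Int) (m : Int) (a : Int) (b : Int) : Int :=
  if hm : m ≤ 0 then 0
  else
    let ans := PySem.Int.floordiv (n * (n - 1)) 2 * PySem.Int.floordiv a m
               + n * PySem.Int.floordiv b m
    let a1 := PySem.Int.mod a m
    let b1 := PySem.Int.mod b m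
    let y_max := a1 * n + b1
    if y_max < m then ans
    else ans + floor_sum_alt (PySem.Int.floordiv y_max m) a1 m (PySem.Int.mod y_max m)
termination_by m.toNat
decreasing_by
  have hm' : 0 < m := by omega
  have h1 : 0 ≤ PySem.Int.mod a m ∧ PySem.Int.mod a m < m :=
    ⟨PySem.Int.mod_nonneg a hm', PySem.Int.mod_lt a hm'⟩
  omega

-- ===== PRECONDITION & SPEC =====
-- Pre_ excludes m ≤ 0, the modulus outside floor_sum's natural domain: there A raises
-- ZeroDivisionError (m = 0, and many m < 0 inputs) or loops forever on some m < 0 inputs,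
-- and any value it does return for a negative modulus is accidental.
def Pre_floor_sum (n : Int) (m : Int) (a : Int) (b : Int) : Prop := 0 < m
instance (n : Int) (m : Int) (a : Int) (b : Int) : Decidable (Pre_floor_sum n m a b) := by unfold Pre_floor_sum; infer_instance
def pvWitness_floor_sum : Int × Int × Int × Int := (5, 4, 3, 2)

def Spec_floor_sum (n : Int) (m : Int) (a : Int) (b : Int) (out : Int) : Prop := out = floor_sum_alt n m a b
instance (n : Int) (m : Int) (a : Int) (b : Int) (out : Int) : Decidable (Spec_floor_sum n m a b out) := by unfold Spec_floor_sum; infer_instance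

-- ===== CLAIM (what is proved, stated in full; the proofs are below) =====
def Claim_equal_floor_sum : Prop := ∀ (n : Int) (m : Int) (a : Int) (b : Int), Dom_floor_sum n m a b → Pre_floor_sum n m a b → Spec_floor_sum n m a b (floor_sum n m a b)

-- ===== LEMMAS AND PROOFS =====

-- n * (n - 1) is even, so A's `n*(n-1)*q // 2` equals B's `n*(n-1)//2 * q`.
lemma even_half_mul (n q : Int) :
    PySem.Int.floordiv (n * (n - 1) * q) 2 = PySem.Int.floordiv (n * (n - 1)) 2 * q := by
  obtain ⟨t, ht⟩ : Even (n * (n - 1)) := by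
    rcases Int.even_or_odd n with h | h
    · exact h.mul_right _
    · exact (h.sub_odd odd_one).mul_left _
  rw [PySem.Int.floordiv_eq_ediv_of_pos (a := n * (n - 1) * q) (by norm_num),
      PySem.Int.floordiv_eq_ediv_of_pos (a := n * (n - 1)) (by norm_num)]
  have ht2 : n * (n - 1) = 2 * t := by omega
  rw [ht2, mul_assoc, Int.mul_ediv_cancel_left _ (by norm_num),
      Int.mul_ediv_cancel_left _ (by norm_num)]

-- The one real lemma: A's loop with accumulator `ans` computes `ans + floor_sum_alt …` for 0 < m.
lemma loopA_eq_alt : ∀ (k : Nat) (n m a b ans : Int), m.toNat = k → 0 < m →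
    floorSumLoopA n m a b ans = ans + floor_sum_alt n m a b := by
  intro k
  induction k using Nat.strong_induction_on with
  | _ k ih =>
    intro n m a b ans hk hm
    rw [floorSumLoopA, floor_sum_alt]
    simp only [dif_neg (by omega : ¬ m ≤ 0)]
    have hdiv : ∀ x : Int, 0 ≤ x → x < m → PySem.Int.floordiv x m = 0 := by
      intro x h0 h1
      rw [PySem.Int.floordiv_eq_ediv_of_pos hm]; exact Int.ediv_eq_zero_of_lt h0 h1
    have hmod : ∀ x : Int, 0 ≤ x → x < m → PySem.Int.mod x m = x := by
      intro x h0 h1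
      rw [PySem.Int.mod_eq_emod_of_pos hm]; exact Int.emod_eq_of_lt h0 h1
    -- the normalized a, b and the accumulated increment agree between the two bodies
    have ha1 : (if a ≥ m ∨ a < 0 then PySem.Int.mod a m else a) = PySem.Int.mod a m := by
      split
      · rfl
      · rename_i h; exact (hmod a (by omega) (by omega)).symm
    have hb1 : (if b ≥ m ∨ b < 0 then PySem.Int.mod b m else b) = PySem.Int.mod b m := by
      split
      · rfl
      · rename_i h; exact (hmod b (by omega) (by omega)).symm
    have hansA : (if b ≥ m ∨ b < 0 then
          (if a ≥ m ∨ a < 0 then ans + PySem.Int.floordiv (n * (n - 1) * (PySem.Int.floordiv a m)) 2 else ans)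
            + n * PySem.Int.floordiv b m
        else (if a ≥ m ∨ a < 0 then ans + PySem.Int.floordiv (n * (n - 1) * (PySem.Int.floordiv a m)) 2 else ans))
        = ans + (PySem.Int.floordiv (n * (n - 1)) 2 * PySem.Int.floordiv a m
                 + n * PySem.Int.floordiv b m) := by
      have ea : (if a ≥ m ∨ a < 0 then ans + PySem.Int.floordiv (n * (n - 1) * (PySem.Int.floordiv a m)) 2 else ans)
          = ans + PySem.Int.floordiv (n * (n - 1)) 2 * PySem.Int.floordiv a m := by
        split
        · rw [even_half_mul]
        · rename_i h; rw [hdiv a (by omega) (by omega)]; ring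
      rw [ea]
      split
      · ring
      · rename_i h; rw [hdiv b (by omega) (by omega)]; ring
    simp only [ha1, hb1, hansA]
    set a1 := PySem.Int.mod a m with ha1d
    set b1 := PySem.Int.mod b m with hb1d
    set inc := PySem.Int.floordiv (n * (n - 1)) 2 * PySem.Int.floordiv a m
               + n * PySem.Int.floordiv b m with hincd
    by_cases hy : a1 * n + b1 < m
    · simp only [if_pos hy]
    · simp only [if_neg hy]
      have ha1b : 0 ≤ a1 ∧ a1 < m := ⟨PySem.Int.mod_nonneg a hm, PySem.Int.mod_lt a hm⟩
      have hb1b : 0 ≤ b1 ∧ b1 < m := ⟨PySem.Int.mod_nonneg b hm, PySem.Int.mod_lt b hm⟩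
      have ha1pos : 0 < a1 := by
        rcases lt_or_eq_of_le ha1b.1 with h | h
        · exact h
        · exfalso; rw [← h] at hy; simp at hy; omega
      have := ih a1.toNat (by omega) (PySem.Int.floordiv (a1 * n + b1) m) a1 m
                 (PySem.Int.mod (a1 * n + b1) m) (ans + inc) rfl ha1pos
      rw [this]; ring

-- ===== VERDICT (by name: the statement is the Claim_ definition above) =====
theorem floor_sum_spec : Claim_equal_floor_sum := by
  intro n m a b _ hpre
  unfold Spec_floor_sum floor_sum
  rw [loopA_eq_alt m.toNat n m a b 0 rfl hpre, zero_add]
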